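-- pv_equiv track=rewrite | github.com/andrejvysny/fiit-vinf | tools/crawl_stats.py | compute_run_segments
-- ===== SOURCE A (Python) =====
-- from typing import Dict, Iterable, List, Optional, Sequence, Tuple
--
-- def compute_run_segments(timestamps: List[int], gap_seconds: int = 300) -> List[Tuple[int, int, int]]:
--     """Compute run segments from sorted timestamps.
--
--     A run segment is a contiguous sequence of timestamps where gaps between
--     consecutive timestamps are <= gap_seconds. Returns list of tuples
--     (start_ts, end_ts, duration_seconds).
--     """
--     if not timestamps:
--         return []
--
--     ts_sorted = sorted(timestamps)
--     segments: List[Tuple[int, int, int]] = []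
--     start = ts_sorted[0]
--     prev = start
--
--     for t in ts_sorted[1:]:
--         if t - prev > gap_seconds:
--             # gap larger than threshold -> close previous run
--             segments.append((start, prev, prev - start))
--             start = t
--         prev = t
--
--     # close final run
--     segments.append((start, prev, prev - start))
--     return segments
-- ===== SOURCE B (Python) =====
-- def compute_run_segments(timestamps, gap_seconds=300):
--     """Boundary-table re-implementation: pass 1 collects the indices where the
--     gap threshold is exceeded into a break table; pass 2 emits one
--     (start, end, duration) tuple per consecutive boundary pair by indexing."""
--     if not timestamps:
--         return []
--     ts = sorted(timestamps)
--     n = len(ts)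
--     breaks = [i for i in range(1, n) if ts[i] - ts[i - 1] > gap_seconds]
--     bounds = [0] + breaks + [n]
--     return [(ts[lo], ts[hi - 1], ts[hi - 1] - ts[lo])
--             for lo, hi in zip(bounds, bounds[1:])]
-- ===== Notes on version B (the rewrite author's own statement) =====
-- stated objective: alternative
-- what changed: B replaces A's single-pass start/prev accumulator with an index-based two-phase algorithm: one pass builds a table of break indices (boundaries), then segments are emitted by indexing the sorted array at consecutive boundary pairs.
import Mathlib
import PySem

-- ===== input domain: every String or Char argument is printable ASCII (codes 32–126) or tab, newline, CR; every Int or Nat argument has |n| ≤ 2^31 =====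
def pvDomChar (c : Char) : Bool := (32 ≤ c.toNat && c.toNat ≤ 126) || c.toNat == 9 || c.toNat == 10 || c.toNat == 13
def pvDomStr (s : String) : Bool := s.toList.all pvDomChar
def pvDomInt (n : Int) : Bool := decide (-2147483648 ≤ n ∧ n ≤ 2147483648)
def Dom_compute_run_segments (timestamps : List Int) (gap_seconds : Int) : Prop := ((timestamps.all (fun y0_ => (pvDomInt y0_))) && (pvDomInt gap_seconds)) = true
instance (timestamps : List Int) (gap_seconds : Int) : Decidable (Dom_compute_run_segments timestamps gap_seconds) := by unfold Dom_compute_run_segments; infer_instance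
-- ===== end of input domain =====

-- B replaces A's single-pass start/prev accumulator with an index-based two-phase
-- algorithm: a break-index table is built first, then segments are emitted by
-- indexing the sorted list at consecutive boundary pairs; same cost.

-- ===== PORT A =====
-- one loop step of A: state (segments, start, prev), next timestamp t
def pvStepA (gap_seconds : Int) (st : List (Int × Int × Int) × Int × Int) (t : Int) :
    List (Int × Int × Int) × Int × Int :=
  match st with
  | (segments, start, prev) =>
    if t - prev > gap_seconds then (segments ++ [(start, prev, prev - start)], t, t)
    else (segments, start, t)

def compute_run_segments (timestamps : List Int) (gap_seconds : Int) : List (Int × Int × Int) :=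
  if timestamps.isEmpty then []
  else
    let ts_sorted := PySem.List.sorted timestamps (fun x => x) false
    -- ts_sorted[0]: safe (headD) because ts_sorted is nonempty here
    let start := ts_sorted.headD 0
    let prev := start
    match (PySem.List.slice ts_sorted (some 1) none).foldl (pvStepA gap_seconds) ([], start, prev) with
    | (segments, start, prev) => segments ++ [(start, prev, prev - start)]

-- ===== PORT B =====
-- Source B's break-table comprehension: [i for i in range(1, n) if ts[i] - ts[i-1] > gap_seconds]
-- (ts[i], ts[i-1] are in range for i in range(1, n); ported with pyGetD)
def pvBreaks (ts : List Int) (gap_seconds : Int) : List Int :=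
  (PySem.List.pyRange 1 (ts.length : Int) 1).filter
    (fun i => decide (PySem.List.pyGetD ts i 0 - PySem.List.pyGetD ts (i - 1) 0 > gap_seconds))

-- Source B's per-boundary-pair emission: (lo, hi) -> (ts[lo], ts[hi-1], ts[hi-1]-ts[lo])
def pvEmitB (ts : List Int) (p : Int × Int) : Int × Int × Int :=
  (PySem.List.pyGetD ts p.1 0, PySem.List.pyGetD ts (p.2 - 1) 0,
   PySem.List.pyGetD ts (p.2 - 1) 0 - PySem.List.pyGetD ts p.1 0)

def compute_run_segments_alt (timestamps : List Int) (gap_seconds : Int) : List (Int × Int × Int) :=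
  if timestamps.isEmpty then []
  else
    let ts := PySem.List.sorted timestamps (fun x => x) false
    let bounds := 0 :: (pvBreaks ts gap_seconds ++ [(ts.length : Int)])
    -- zip(bounds, bounds[1:])
    (bounds.zip (PySem.List.slice bounds (some 1) none)).map (pvEmitB ts)

-- ===== PRECONDITION & SPEC =====
def Spec_compute_run_segments (timestamps : List Int) (gap_seconds : Int) (out : List (Int × Int × Int)) : Prop := out = compute_run_segments_alt timestamps gap_seconds
instance (timestamps : List Int) (gap_seconds : Int) (out : List (Int × Int × Int)) : Decidable (Spec_compute_run_segments timestamps gap_seconds out) := by unfold Spec_compute_run_segments; infer_instance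

-- ===== CLAIM (what is proved, stated in full; the proofs are below) =====
def Claim_equal_compute_run_segments : Prop := ∀ (timestamps : List Int) (gap_seconds : Int), Dom_compute_run_segments timestamps gap_seconds → Spec_compute_run_segments timestamps gap_seconds (compute_run_segments timestamps gap_seconds)

-- ===== LEMMAS AND PROOFS =====

-- common recursive description of the segment list (proof helper only)
def pvRuns (gap start prev : Int) : List Int → List (Int × Int × Int)
  | [] => [(start, prev, prev - start)]
  | t :: rest =>
    if t - prev > gap then (start, prev, prev - start) :: pvRuns gap t t rest
    else pvRuns gap start t rest

-- A's "close final run" step (proof helper)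
def pvFinishA (st : List (Int × Int × Int) × Int × Int) : List (Int × Int × Int) :=
  st.1 ++ [(st.2.1, st.2.2, st.2.2 - st.2.1)]

-- A's loop finishes to the accumulated segments plus the runs of the remaining list
lemma pvA_loop (gap : Int) (rest : List Int) : ∀ (acc : List (Int × Int × Int)) (start prev : Int),
    pvFinishA (rest.foldl (pvStepA gap) (acc, start, prev)) = acc ++ pvRuns gap start prev rest := by
  induction rest with
  | nil => intro acc start prev; simp [pvFinishA, pvRuns]
  | cons t rest ih =>
    intro acc start prev
    simp only [List.foldl_cons, pvStepA, pvRuns]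
    by_cases h : t - prev > gap
    · rw [if_pos h, if_pos h, ih]; simp
    · rw [if_neg h, if_neg h, ih]

-- B's segment list with the first segment's start overridden by s (proof helper)
def pvSegsFrom (gap s : Int) (ts : List Int) : List (Int × Int × Int) :=
  match pvBreaks ts gap ++ [(ts.length : Int)] with
  | [] => []
  | b1 :: rest =>
    (s, PySem.List.pyGetD ts (b1 - 1) 0, PySem.List.pyGetD ts (b1 - 1) 0 - s)
      :: ((b1 :: rest).zip rest).map (pvEmitB ts)

lemma pvGetD_cons_pos (x : Int) (xs : List Int) (i : Int) (h : 1 ≤ i) :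
    PySem.List.pyGetD (x :: xs) i 0 = PySem.List.pyGetD xs (i - 1) 0 := by
  simp only [PySem.List.pyGetD, PySem.List.pyGet?, PySem.List.pyIdx?, List.length_cons]
  obtain ⟨k, hk⟩ : ∃ k, i.toNat = k + 1 := ⟨i.toNat - 1, by omega⟩
  have hk' : (i - 1).toNat = k := by omega
  split_ifs <;> simp_all <;> omega

lemma pvMem_breaks {ts : List Int} {gap i : Int} (h : i ∈ pvBreaks ts gap) :
    1 ≤ i ∧ i < (ts.length : Int) := by
  simp only [pvBreaks, List.mem_filter, PySem.List.mem_pyRange_one] at h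
  exact h.1

lemma pvRange_shift (a b : Int) :
    PySem.List.pyRange (a + 1) (b + 1) 1 = (PySem.List.pyRange a b 1).map (· + 1) := by
  rw [PySem.List.pyRange_one, PySem.List.pyRange_one, List.map_map]
  rw [show (b + 1 - (a + 1)).toNat = (b - a).toNat by omega]
  apply List.map_congr_left
  intro k _
  simp
  omega

-- shifting one element onto the front shifts the break table by one
lemma pvBreaks_cons (gap p t : Int) (rest : List Int) :
    pvBreaks (p :: t :: rest) gap =
      (if t - p > gap then [1] else []) ++ (pvBreaks (t :: rest) gap).map (· + 1) := by
  have hrange : PySem.List.pyRange 1 (((p :: t :: rest).length : Int)) 1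
      = 1 :: (PySem.List.pyRange 1 ((t :: rest).length : Int) 1).map (· + 1) := by
    rw [show (((p :: t :: rest).length : Int)) = ((t :: rest).length : Int) + 1 by
        push_cast [List.length_cons]; ring,
      PySem.List.pyRange_one_cons (by push_cast [List.length_cons]; omega)]
    rw [pvRange_shift 1 _]
  have hfil : (PySem.List.pyRange 1 ((t :: rest).length : Int) 1).filter
        ((fun i => decide (PySem.List.pyGetD (p :: t :: rest) i 0 - PySem.List.pyGetD (p :: t :: rest) (i - 1) 0 > gap)) ∘ (· + 1))
      = (PySem.List.pyRange 1 ((t :: rest).length : Int) 1).filter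
        (fun i => decide (PySem.List.pyGetD (t :: rest) i 0 - PySem.List.pyGetD (t :: rest) (i - 1) 0 > gap)) := by
    apply List.filter_congr
    intro i hi
    have hi1 : 1 ≤ i := ((PySem.List.mem_pyRange_one).mp hi).1
    simp only [Function.comp]
    have ha : PySem.List.pyGetD (p :: t :: rest) (i + 1) 0 = PySem.List.pyGetD (t :: rest) i 0 := by
      rw [pvGetD_cons_pos _ _ _ (by omega), show i + 1 - 1 = i by ring]
    have hb : PySem.List.pyGetD (p :: t :: rest) (i + 1 - 1) 0
        = PySem.List.pyGetD (t :: rest) (i - 1) 0 := by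
      rw [show i + 1 - 1 = i by ring, pvGetD_cons_pos _ _ _ hi1]
    rw [ha, hb]
  have h1 : PySem.List.pyGetD (p :: t :: rest) 1 0 = t := by
    rw [pvGetD_cons_pos _ _ _ le_rfl]
    norm_num [PySem.List.pyGetD_zero_cons]
  have h0 : PySem.List.pyGetD (p :: t :: rest) (1 - 1) 0 = p := by
    norm_num [PySem.List.pyGetD_zero_cons]
  simp only [pvBreaks, hrange, List.filter_cons, List.filter_map, hfil, h1, h0]
  by_cases hb : t - p > gap
  · rw [if_pos (by simpa using hb), if_pos hb]
    rfl
  · rw [if_neg (by simpa using hb), if_neg hb]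
    rfl

-- shifting the indices of a boundary pair undoes shifting the list
lemma pvEmit_shift (x : Int) (ts : List Int) (q : Int × Int) (h1 : 0 ≤ q.1) (h2 : 1 ≤ q.2) :
    pvEmitB (x :: ts) (q.1 + 1, q.2 + 1) = pvEmitB ts q := by
  have e1 : PySem.List.pyGetD (x :: ts) (q.1 + 1) 0 = PySem.List.pyGetD ts q.1 0 := by
    rw [pvGetD_cons_pos _ _ _ (by omega), show q.1 + 1 - 1 = q.1 by ring]
  have e2 : PySem.List.pyGetD (x :: ts) q.2 0 = PySem.List.pyGetD ts (q.2 - 1) 0 :=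
    pvGetD_cons_pos x ts q.2 h2
  simp [pvEmitB, e1, e2]

-- shifting every boundary undoes shifting the list, pair by pair
lemma pvZipMap_shift (x : Int) (ts : List Int) (u v : List Int)
    (hu : ∀ e ∈ u, 0 ≤ e) (hv : ∀ e ∈ v, 1 ≤ e) :
    ((u.map (· + 1)).zip (v.map (· + 1))).map (pvEmitB (x :: ts)) = (u.zip v).map (pvEmitB ts) := by
  rw [List.zip_map, List.map_map]
  apply List.map_congr_left
  intro q hq
  obtain ⟨hq1, hq2⟩ := List.of_mem_zip hq
  simpa using pvEmit_shift x ts q (hu _ hq1) (hv _ hq2)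

-- the override segments equal the recursive description
lemma pvSegsFrom_eq_runs (gap : Int) : ∀ (tl : List Int) (s p : Int),
    pvSegsFrom gap s (p :: tl) = pvRuns gap s p tl := by
  intro tl
  induction tl with
  | nil =>
    intro s p
    have hbr : pvBreaks [p] gap = [] := by
      simp [pvBreaks, PySem.List.pyRange_one_eq_nil]
    simp [pvSegsFrom, hbr, pvRuns, PySem.List.pyGetD_zero_cons]
  | cons t rest ih =>
    intro s p
    have hone : ∀ e ∈ pvBreaks (t :: rest) gap ++ [((t :: rest).length : Int)], 1 ≤ e := by
      intro e he
      rcases List.mem_append.mp he with h | h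
      · exact (pvMem_breaks h).1
      · simp at h; omega
    obtain ⟨c, l', hcl⟩ : ∃ c l', pvBreaks (t :: rest) gap ++ [((t :: rest).length : Int)] = c :: l' := by
      cases hx : pvBreaks (t :: rest) gap ++ [((t :: rest).length : Int)] with
      | nil => simp at hx
      | cons c l' => exact ⟨c, l', rfl⟩
    have hLseg : pvBreaks (p :: t :: rest) gap ++ [(((p :: t :: rest).length : Int))]
        = (if t - p > gap then [1] else []) ++ (c :: l').map (· + 1) := by
      rw [pvBreaks_cons, ← hcl]
      simp [List.map_append]
    have hc1 : 1 ≤ c := hone c (hcl ▸ List.mem_cons_self ..)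
    have honel : ∀ e ∈ c :: l', 1 ≤ e := fun e he => hone e (hcl ▸ he)
    by_cases hb : t - p > gap
    · have hL : pvBreaks (p :: t :: rest) gap ++ [(((p :: t :: rest).length : Int))]
          = 1 :: (c :: l').map (· + 1) := by rw [hLseg, if_pos hb]; rfl
      have hIH := ih t t
      simp only [pvSegsFrom, hL, hcl] at hIH ⊢
      rw [pvRuns, if_pos hb, ← hIH]
      have h00 : PySem.List.pyGetD (p :: t :: rest) (1 - 1) 0 = p := by
        norm_num [PySem.List.pyGetD_zero_cons]
      rw [h00]
      congr 1
      have hmap : (1 : Int) :: (c :: l').map (· + 1) = ((0 :: c :: l').map (· + 1)) := by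
        norm_num
      have hu0 : ∀ e ∈ (0 : Int) :: c :: l', 0 ≤ e := by
        intro e he
        rcases List.mem_cons.mp he with h | h
        · omega
        · have := honel e h
          omega
      rw [hmap, pvZipMap_shift p (t :: rest) (0 :: c :: l') (c :: l') hu0 honel]
      simp only [List.zip_cons_cons, List.map_cons]
      congr 1
      simp [pvEmitB, PySem.List.pyGetD_zero_cons]
    · have hL : pvBreaks (p :: t :: rest) gap ++ [(((p :: t :: rest).length : Int))]
          = (c + 1) :: l'.map (· + 1) := by rw [hLseg, if_neg hb]; rfl
      have hIH := ih s t
      simp only [pvSegsFrom, hL, hcl] at hIH ⊢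
      rw [pvRuns, if_neg hb, ← hIH]
      have hget : PySem.List.pyGetD (p :: t :: rest) (c + 1 - 1) 0
          = PySem.List.pyGetD (t :: rest) (c - 1) 0 := by
        rw [show c + 1 - 1 = c by ring, pvGetD_cons_pos _ _ _ hc1]
      rw [hget]
      congr 1
      have hmap : (c + 1) :: l'.map (· + 1) = ((c :: l').map (· + 1)) := by
        norm_num
      rw [hmap, pvZipMap_shift p (t :: rest) (c :: l') l'
        (by intro e he; have := honel e he; omega)
        (fun e he => honel e (List.mem_cons_of_mem _ he))]

-- ===== VERDICT (by name: the statement is the Claim_ definition above) =====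
theorem compute_run_segments_spec : Claim_equal_compute_run_segments := by
  intro timestamps gap _
  unfold Spec_compute_run_segments compute_run_segments compute_run_segments_alt
  by_cases hE : timestamps.isEmpty
  · rw [if_pos hE, if_pos hE]
  · rw [if_neg hE, if_neg hE]
    have hne : timestamps ≠ [] := by simpa [List.isEmpty_iff] using hE
    have hs : PySem.List.sorted timestamps (fun x => x) false ≠ [] := by
      simpa [PySem.List.sorted_eq_nil_iff] using hne
    obtain ⟨h, tl, hts⟩ := List.exists_cons_of_ne_nil hs
    obtain ⟨c, l', hcl⟩ : ∃ c l', pvBreaks (h :: tl) gap ++ [((h :: tl).length : Int)] = c :: l' := by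
      cases hx : pvBreaks (h :: tl) gap ++ [((h :: tl).length : Int)] with
      | nil => simp at hx
      | cons c l' => exact ⟨c, l', rfl⟩
    simp only [hts, List.headD_cons, PySem.List.slice_from_one, List.tail_cons]
    show pvFinishA (tl.foldl (pvStepA gap) ([], h, h)) = _
    rw [pvA_loop gap tl [] h h, List.nil_append, ← pvSegsFrom_eq_runs gap tl h h]
    simp only [pvSegsFrom, hcl, List.zip_cons_cons, List.map_cons]
    congr 1
    simp [pvEmitB, PySem.List.pyGetD_zero_cons]
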